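-- pv_equiv track=rewrite | github.com/mozgovm/tg-weather-bot-python | geolocation.py | get_index_of_location
-- ===== SOURCE A (Python) =====
-- def get_index_of_location(last_locations, location_name):
--     result = []
--     for i, location in enumerate(last_locations):
--         result.append(location['locationName'] == location_name)
--     if True in result:
--         return result.index(True)
--     else:
--         return -1
-- ===== SOURCE B (Python) =====
-- def get_index_of_location(last_locations, location_name):
--     for i, location in enumerate(last_locations):
--         if location['locationName'] == location_name:
--             return i
--     return -1
-- ===== Notes on version B (the rewrite author's own statement) =====
-- stated objective: simpler
-- what changed: A builds a full boolean list and then rescans it twice ('True in result' and 'result.index(True)'); B is a single pass that returns the index at the first match, with no intermediate list.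
import Mathlib
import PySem

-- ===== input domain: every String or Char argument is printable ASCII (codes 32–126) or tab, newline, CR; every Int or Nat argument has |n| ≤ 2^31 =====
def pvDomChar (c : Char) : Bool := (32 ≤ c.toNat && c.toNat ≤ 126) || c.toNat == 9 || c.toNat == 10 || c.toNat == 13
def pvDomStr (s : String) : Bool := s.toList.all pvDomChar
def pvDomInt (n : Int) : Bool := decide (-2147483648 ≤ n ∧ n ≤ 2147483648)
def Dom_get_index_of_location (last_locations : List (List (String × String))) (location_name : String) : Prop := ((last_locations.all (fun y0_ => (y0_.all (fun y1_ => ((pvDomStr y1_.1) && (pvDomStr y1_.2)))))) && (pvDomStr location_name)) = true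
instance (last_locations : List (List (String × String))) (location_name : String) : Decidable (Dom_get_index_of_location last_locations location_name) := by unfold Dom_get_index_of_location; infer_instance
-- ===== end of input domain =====

-- B replaces A's build-boolean-list-then-rescan (membership test + .index) by one direct
-- indexed pass returning at the first match (objective: simpler, same asymptotic cost).

-- ===== PORT A =====
-- location['locationName'] : under Pre_ the key is present; the "" default is never used there
def pvLookupName (loc : List (String × String)) : String :=
  PySem.Dict.getD (PySem.Dict.mk loc) "locationName" ""

def get_index_of_location (last_locations : List (List (String × String))) (location_name : String) : Int :=
  -- result = []; for i, location in enumerate(last_locations): result.append(... == location_name)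
  let result : List Bool :=
    last_locations.foldl (fun acc loc => acc ++ [pvLookupName loc == location_name]) []
  -- if True in result: return result.index(True) else: return -1
  if result.contains true then
    match PySem.List.index? result true with
    | some k => (k : Int)
    | none => -1
  else
    -1

-- ===== PORT B =====
def pvFindIdx (last_locations : List (List (String × String))) (location_name : String) (i : Int) : Int :=
  match last_locations with
  | [] => -1
  | loc :: rest =>
      if pvLookupName loc == location_name then i
      else pvFindIdx rest location_name (i + 1)

def get_index_of_location_alt (last_locations : List (List (String × String))) (location_name : String) : Int :=
  pvFindIdx last_locations location_name 0

-- ===== PRECONDITION & SPEC =====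
-- Pre_ excludes exactly the inputs where some location dict lacks the key 'locationName',
-- on which the Python A (and B) raises KeyError.
def Pre_get_index_of_location (last_locations : List (List (String × String))) (location_name : String) : Prop :=
  (last_locations.all (fun loc => loc.any (fun p => p.1 == "locationName"))) = true
instance (last_locations : List (List (String × String))) (location_name : String) : Decidable (Pre_get_index_of_location last_locations location_name) := by unfold Pre_get_index_of_location; infer_instance

def pvWitness_get_index_of_location : (List (List (String × String))) × String :=
  ([[("locationName", "Paris"), ("lat", "48")], [("locationName", "Oslo")]], "Oslo")

def Spec_get_index_of_location (last_locations : List (List (String × String))) (location_name : String) (out : Int) : Prop := out = get_index_of_location_alt last_locations location_name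
instance (last_locations : List (List (String × String))) (location_name : String) (out : Int) : Decidable (Spec_get_index_of_location last_locations location_name out) := by unfold Spec_get_index_of_location; infer_instance

-- ===== CLAIM (what is proved, stated in full; the proofs are below) =====
def Claim_equal_get_index_of_location : Prop := ∀ (last_locations : List (List (String × String))) (location_name : String), Dom_get_index_of_location last_locations location_name → Pre_get_index_of_location last_locations location_name → Spec_get_index_of_location last_locations location_name (get_index_of_location last_locations location_name)

-- ===== LEMMAS AND PROOFS =====

theorem foldl_append_singleton {α β : Type} (f : α → β) :
    ∀ (l : List α) (acc : List β),
      l.foldl (fun a x => a ++ [f x]) acc = acc ++ l.map f := by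
  intro l
  induction l with
  | nil => simp
  | cons x xs ih => intro acc; simp [List.foldl, ih]

theorem pvFindIdx_eq (location_name : String) :
    ∀ (l : List (List (String × String))) (i : Int),
      pvFindIdx l location_name i =
        match PySem.List.index? (l.map (fun loc => pvLookupName loc == location_name)) true with
        | some k => i + (k : Int)
        | none => -1 := by
  intro l
  induction l with
  | nil => intro i; rfl
  | cons loc rest ih =>
      intro i
      by_cases h : (pvLookupName loc == location_name) = true
      · rw [show pvFindIdx (loc :: rest) location_name i = i by simp [pvFindIdx, h]]
        rw [List.map_cons, h, PySem.List.index?_cons_self]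
        simp
      · rw [show pvFindIdx (loc :: rest) location_name i
              = pvFindIdx rest location_name (i + 1) by simp [pvFindIdx, h]]
        rw [ih (i + 1), List.map_cons,
            PySem.List.index?_cons_of_ne _ (by simpa using h)]
        cases hk : PySem.List.index? (rest.map (fun loc => pvLookupName loc == location_name)) true with
        | none => simp
        | some k => simp only [Option.map]; push_cast; ring_nf

theorem ports_agree (last_locations : List (List (String × String))) (location_name : String) :
    get_index_of_location last_locations location_name
      = get_index_of_location_alt last_locations location_name := by
  unfold get_index_of_location get_index_of_location_alt
  rw [foldl_append_singleton, pvFindIdx_eq]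
  simp only [List.nil_append]
  cases hk : PySem.List.index? (last_locations.map (fun loc => pvLookupName loc == location_name)) true with
  | some k =>
      have hmem : true ∈ last_locations.map (fun loc => pvLookupName loc == location_name) :=
        (PySem.List.index?_isSome_iff _ true).mp (by rw [hk]; rfl)
      rw [if_pos (by simpa using hmem)]
      
      simp
  | none =>
      have hnmem : true ∉ last_locations.map (fun loc => pvLookupName loc == location_name) :=
        (PySem.List.index?_eq_none_iff _ true).mp hk
      rw [if_neg (by simpa using hnmem)]

-- ===== VERDICT (by name: the statement is the Claim_ definition above) =====
theorem get_index_of_location_spec : Claim_equal_get_index_of_location := by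
  intro ll name _ _
  unfold Spec_get_index_of_location
  exact ports_agree ll name
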